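-- pv_equiv track=rewrite | github.com/mevanoff24/HandwritingDetection | build/app/models/context2vec/src/dataset.py | _gathered_by_lengths
-- ===== SOURCE A (Python) =====
-- def _gathered_by_lengths(X):
--     """Order input text by length of text"""
--     lengths = [(index, len(sent)) for index, sent in enumerate(X)]
--     lengths = sorted(lengths, key=lambda x: x[1], reverse=True)
--
--     sent_dict = {}
--     current_length = -1
--     for i, length in lengths:
--         if current_length == length:
--             sent_dict[length].append(i)
--         else:
--             sent_dict[length] = [i]
--             current_length = length
--
--     return sent_dict
-- ===== SOURCE B (Python) =====
-- def _gathered_by_lengths(X):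
--     """Order input text by length of text"""
--     buckets = {}
--     for index, sent in enumerate(X):
--         buckets.setdefault(len(sent), []).append(index)
--     return {length: buckets[length] for length in sorted(buckets, reverse=True)}
-- ===== Notes on version B (the rewrite author's own statement) =====
-- stated objective: faster
-- what changed: B replaces A's full stable sort of all (index, length) pairs plus a current-length grouping loop by one dict pass that buckets indices by length, sorting only the distinct lengths descending.
import Mathlib
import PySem

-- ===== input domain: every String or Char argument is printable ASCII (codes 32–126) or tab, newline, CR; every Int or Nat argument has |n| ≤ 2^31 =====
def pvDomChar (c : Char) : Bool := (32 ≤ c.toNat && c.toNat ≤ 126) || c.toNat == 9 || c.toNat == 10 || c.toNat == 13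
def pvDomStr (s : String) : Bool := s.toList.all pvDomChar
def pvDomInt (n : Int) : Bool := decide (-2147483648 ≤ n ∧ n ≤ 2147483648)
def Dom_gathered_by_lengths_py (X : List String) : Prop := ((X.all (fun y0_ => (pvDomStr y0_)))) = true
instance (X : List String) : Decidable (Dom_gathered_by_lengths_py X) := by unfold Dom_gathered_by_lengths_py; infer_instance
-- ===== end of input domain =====

-- B buckets indices by length in one dict pass and sorts only the distinct lengths,
-- instead of A's full stable sort of all (index, length) pairs (objective: faster, asymptotic).

-- ===== PORT A =====
-- A's loop step: `sent_dict[length].append(i)` appends to the existing entry (the key is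
-- always present when that branch runs, so `modify length [] (· ++ [i])` is exact there);
-- the else-branch is `sent_dict[length] = [i]` plus `current_length = length`.
def gathered_by_lengths_py (X : List String) : List (Int × List Int) :=
  let lengths := (PySem.List.enumerate X).map (fun p => (p.1, PySem.Str.len p.2))
  let lengths := PySem.List.sorted lengths (fun x => x.2) true
  let r := lengths.foldl
    (fun (st : PySem.Dict Int (List Int) × Int) p =>
      if st.2 == p.2 then (st.1.modify p.2 [] (· ++ [p.1]), st.2)
      else (st.1.insert p.2 [p.1], p.2))
    (PySem.Dict.empty, -1)
  r.1.items

-- ===== PORT B =====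
-- `buckets.setdefault(len(sent), []).append(index)` is exactly `modify (len sent) [] (· ++ [index])`.
def gathered_by_lengths_py_alt (X : List String) : List (Int × List Int) :=
  let buckets := (PySem.List.enumerate X).foldl
    (fun (d : PySem.Dict Int (List Int)) p => d.modify (PySem.Str.len p.2) [] (· ++ [p.1]))
    PySem.Dict.empty
  (PySem.List.sorted buckets.keys (fun k => k) true).map (fun k => (k, buckets.getD k []))

-- ===== PRECONDITION & SPEC =====
def Spec_gathered_by_lengths_py (X : List String) (out : List (Int × List Int)) : Prop := out = gathered_by_lengths_py_alt X
instance (X : List String) (out : List (Int × List Int)) : Decidable (Spec_gathered_by_lengths_py X out) := by unfold Spec_gathered_by_lengths_py; infer_instance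

-- ===== CLAIM (what is proved, stated in full; the proofs are below) =====
def Claim_equal_gathered_by_lengths_py : Prop := ∀ (X : List String), Dom_gathered_by_lengths_py X → Spec_gathered_by_lengths_py X (gathered_by_lengths_py X)

-- ===== LEMMAS AND PROOFS =====

-- group a pair list by its first-occurring second component (the common form both sides reach)
def canonGroups : List (Int × Int) → List (Int × List Int)
  | [] => []
  | p :: L =>
    (p.2, p.1 :: (L.filter (fun q => q.2 == p.2)).map (fun q => q.1)) ::
      canonGroups (L.filter (fun q => !(q.2 == p.2)))
termination_by L => L.length
decreasing_by
  have := List.length_filter_le (fun (x : {q // q ∈ L}) => !(x.1.2 == p.2)) L.attach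
  simpa using Nat.lt_succ_of_le this

-- appending a fresh-keyed entry to a dict whose last entry is (cur, g)
lemma step_insert (d : PySem.Dict Int (List Int)) (k : Int) (v : List Int)
    (h : d.contains k = false) :
    d.insert k v = PySem.Dict.mk (d.items ++ [(k, v)]) := by
  simp [PySem.Dict.insert, h]

lemma contains_mk_append (items : List (Int × List Int)) (e : Int × List Int) (k : Int) :
    (PySem.Dict.mk (items ++ [e])).contains k = ((PySem.Dict.mk items).contains k || (e.1 == k)) := by
  simp [PySem.Dict.contains]

lemma find?_eq_none_of_not_contains (d : PySem.Dict Int (List Int)) (k : Int)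
    (h : d.contains k = false) :
    d.items.find? (fun p => p.1 == k) = none := by
  rw [List.find?_eq_none]
  intro p hp
  simp only [PySem.Dict.contains, List.any_eq_false] at h
  exact fun hc => h p hp hc

lemma map_id_of_not_contains (d : PySem.Dict Int (List Int)) (k : Int) (v : List Int)
    (h : d.contains k = false) :
    d.items.map (fun p => if p.1 = k then (k, v) else p) = d.items := by
  simp only [PySem.Dict.contains, List.any_eq_false] at h
  have hall : ∀ p ∈ d.items, (if p.1 = k then (k, v) else p) = p := by
    intro p hp
    have := h p hp
    simp only [beq_iff_eq] at this
    simp [this]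
  have := List.map_congr_left hall
  simpa using this

lemma step_modify (d : PySem.Dict Int (List Int)) (cur : Int) (g : List Int) (i : Int)
    (h : d.contains cur = false) :
    (PySem.Dict.mk (d.items ++ [(cur, g)])).modify cur [] (· ++ [i])
      = PySem.Dict.mk (d.items ++ [(cur, g ++ [i])]) := by
  have hf := find?_eq_none_of_not_contains d cur h
  simp [PySem.Dict.modify, PySem.Dict.insert, PySem.Dict.getD, PySem.Dict.get?,
        PySem.Dict.contains, List.find?_append, hf]
  exact map_id_of_not_contains d cur (g ++ [i]) h

-- the in-group phase of A's loop
lemma loopA2 (T : List (Int × Int)) :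
    ∀ (d : PySem.Dict Int (List Int)) (cur : Int) (g : List Int),
    T.Pairwise (fun a b => b.2 ≤ a.2) →
    (∀ p ∈ T, p.2 ≤ cur) →
    (∀ p ∈ T, p.2 ≠ cur → d.contains p.2 = false) →
    d.contains cur = false →
    (T.foldl
      (fun (st : PySem.Dict Int (List Int) × Int) p =>
        if st.2 == p.2 then (st.1.modify p.2 [] (· ++ [p.1]), st.2)
        else (st.1.insert p.2 [p.1], p.2))
      (PySem.Dict.mk (d.items ++ [(cur, g)]), cur)).1.items
      = d.items ++ [(cur, g ++ (T.filter (fun q => q.2 == cur)).map (fun q => q.1))]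
          ++ canonGroups (T.filter (fun q => !(q.2 == cur))) := by
  induction T with
  | nil => intro d cur g _ _ _ _; simp [canonGroups]
  | cons p T ih =>
    intro d cur g hp hle hfresh hcur
    by_cases hc : p.2 = cur
    · -- same length: append to the current entry
      have hstep := step_modify d cur g p.1 hcur
      simp only [List.foldl_cons, hc, beq_self_eq_true, if_true, hstep]
      have := ih d cur (g ++ [p.1]) hp.of_cons
        (fun q hq => hle q (List.mem_cons_of_mem _ hq))
        (fun q hq hne => hfresh q (List.mem_cons_of_mem _ hq) hne) hcur
      rw [this]
      simp [hc, List.append_assoc]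
    · -- new, strictly smaller length: fresh insert, recurse with the new current entry
      have hlt : p.2 < cur := lt_of_le_of_ne (hle p (List.mem_cons_self ..)) hc
      have hall : ∀ q ∈ p :: T, q.2 < cur := by
        intro q hq
        rcases List.mem_cons.mp hq with rfl | hq
        · exact hlt
        · exact lt_of_le_of_lt (List.rel_of_pairwise_cons hp hq) hlt
      have hifc : (cur == p.2) = false := by simp [Ne.symm hc]
      have hdp : d.contains p.2 = false := hfresh p (List.mem_cons_self ..) hc
      have hcontains : (PySem.Dict.mk (d.items ++ [(cur, g)])).contains p.2 = false := by
        rw [contains_mk_append]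
        simp only [PySem.Dict.contains] at hdp ⊢
        simp [hdp, Ne.symm hc]
      have hstep := step_insert _ p.2 [p.1] hcontains
      simp only [List.foldl_cons, hifc, Bool.false_eq_true, if_false, hstep]
      have hT2 : ∀ q ∈ T, q.2 ≤ p.2 := fun q hq => List.rel_of_pairwise_cons hp hq
      have hfresh' : ∀ q ∈ T, q.2 ≠ p.2 →
          (PySem.Dict.mk (d.items ++ [(cur, g)])).contains q.2 = false := by
        intro q hq hne
        rw [contains_mk_append]
        have h1 : d.contains q.2 = false :=
          hfresh q (List.mem_cons_of_mem _ hq) (ne_of_lt (hall q (List.mem_cons_of_mem _ hq)))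
        simp only [PySem.Dict.contains] at h1 ⊢
        simp [h1, ne_of_gt (hall q (List.mem_cons_of_mem _ hq))]
      have := ih (PySem.Dict.mk (d.items ++ [(cur, g)])) p.2 [p.1] hp.of_cons hT2 hfresh' hcontains
      simp only [PySem.Dict.items] at this ⊢
      rw [this]
      have hf1 : (p :: T).filter (fun q => q.2 == cur) = [] := by
        rw [List.filter_eq_nil_iff]
        intro q hq
        simp [ne_of_lt (hall q hq)]
      have hf2 : (p :: T).filter (fun q => !(q.2 == cur)) = p :: T := by
        rw [List.filter_eq_self]
        intro q hq
        simp [ne_of_lt (hall q hq)]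
      rw [hf1, hf2]
      simp only [canonGroups]
      simp [List.append_assoc]

-- the whole of A's loop, from a state whose current length matches no element
lemma loopA (S : List (Int × Int)) (cur : Int)
    (hp : S.Pairwise (fun a b => b.2 ≤ a.2))
    (hne : ∀ p ∈ S, p.2 ≠ cur) :
    (S.foldl
      (fun (st : PySem.Dict Int (List Int) × Int) p =>
        if st.2 == p.2 then (st.1.modify p.2 [] (· ++ [p.1]), st.2)
        else (st.1.insert p.2 [p.1], p.2))
      (PySem.Dict.empty, cur)).1.items = canonGroups S := by
  cases S with
  | nil => simp [canonGroups, PySem.Dict.empty]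
  | cons p T =>
    have hifc : (cur == p.2) = false := by
      simp [Ne.symm (hne p (List.mem_cons_self ..))]
    have hemp : (PySem.Dict.empty : PySem.Dict Int (List Int)).contains p.2 = false := by
      simp [PySem.Dict.empty, PySem.Dict.contains]
    have hstep := step_insert (PySem.Dict.empty : PySem.Dict Int (List Int)) p.2 [p.1] hemp
    simp only [List.foldl_cons, hifc, Bool.false_eq_true, if_false, hstep]
    have := loopA2 T PySem.Dict.empty p.2 [p.1] hp.of_cons
      (fun q hq => List.rel_of_pairwise_cons hp hq)
      (fun q _ _ => by simp [PySem.Dict.empty, PySem.Dict.contains])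
      hemp
    simp only [PySem.Dict.empty, List.nil_append] at this ⊢
    rw [this]
    simp only [canonGroups]
    simp

-- PySem.Set.ofList peels its head off the rest
lemma ofList_cons_aux (xs : List Int) :
    ∀ (s : List Int) (a : Int), List.foldl PySem.Set.add (a :: s) xs
      = a :: List.foldl PySem.Set.add s (xs.filter (fun x => !(x == a))) := by
  induction xs with
  | nil => simp
  | cons x xs ih =>
    intro s a
    by_cases hx : x = a
    · subst hx
      have h1 : PySem.Set.add (x :: s) x = x :: s := by
        simp [PySem.Set.add, PySem.Set.contains]
      rw [List.foldl_cons, h1, List.filter_cons]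
      simp only [beq_self_eq_true, Bool.not_true, Bool.false_eq_true, if_false]
      exact ih s x
    · by_cases hs : x ∈ s
      · have h1 : PySem.Set.add (a :: s) x = a :: s := by
          simp [PySem.Set.add, PySem.Set.contains, hs]
        have h2 : PySem.Set.add s x = s := by
          simp [PySem.Set.add, PySem.Set.contains, hs]
        rw [List.foldl_cons, h1, List.filter_cons]
        have : (!(x == a)) = true := by simp [hx]
        rw [this, if_pos rfl, List.foldl_cons, h2]
        exact ih s a
      · have h1 : PySem.Set.add (a :: s) x = a :: (s ++ [x]) := by
          simp [PySem.Set.add, PySem.Set.contains, hs, hx]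
        have h2 : PySem.Set.add s x = s ++ [x] := by
          simp [PySem.Set.add, PySem.Set.contains, hs]
        rw [List.foldl_cons, h1, List.filter_cons]
        have : (!(x == a)) = true := by simp [hx]
        rw [this, if_pos rfl, List.foldl_cons, h2]
        exact ih (s ++ [x]) a

lemma dedup_cons (a : Int) (xs : List Int) :
    PySem.Set.ofList (a :: xs) = a :: PySem.Set.ofList (xs.filter (fun x => !(x == a))) := by
  rw [PySem.Set.ofList_eq_foldl, PySem.Set.ofList_eq_foldl]
  have h0 : PySem.Set.add ([] : List Int) a = [a] := by
    simp [PySem.Set.add, PySem.Set.contains]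
  simp only [List.foldl_cons, h0]
  exact ofList_cons_aux xs [] a

-- canonGroups in dict-comprehension form
lemma canon_eq_aux : ∀ (n : Nat) (L : List (Int × Int)), L.length ≤ n →
    canonGroups L = (PySem.List.dedup (L.map (fun q => q.2))).map
      (fun k => (k, (L.filter (fun q => q.2 == k)).map (fun q => q.1))) := by
  intro n
  induction n with
  | zero =>
    intro L hlen
    have : L = [] := List.eq_nil_of_length_eq_zero (Nat.le_zero.mp hlen)
    subst this
    simp [canonGroups, PySem.List.dedup, PySem.Set.ofList_eq_foldl]
  | succ n ih =>
    intro L hlen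
    cases L with
    | nil => simp [canonGroups, PySem.List.dedup, PySem.Set.ofList_eq_foldl]
    | cons p L =>
      simp only [canonGroups, PySem.List.dedup, List.map_cons, dedup_cons, List.filter_map]
      have hcomp : ((fun x => !(x == p.2)) ∘ fun q : Int × Int => q.2)
          = fun q : Int × Int => !(q.2 == p.2) := rfl
      rw [hcomp]
      congr 1
      · simp
      · rw [ih (L.filter (fun q => !(q.2 == p.2)))
          (le_trans (List.length_filter_le _ _) (Nat.le_of_succ_le_succ hlen))]
        simp only [PySem.List.dedup]
        apply List.map_congr_left
        intro k hk
        have hkne : k ≠ p.2 := by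
          rw [PySem.Set.mem_ofList] at hk
          obtain ⟨q, hq, rfl⟩ := List.mem_map.mp hk
          simpa using List.of_mem_filter hq
        have h1 : (p :: L).filter (fun q => q.2 == k) = L.filter (fun q => q.2 == k) := by
          simp [Ne.symm hkne]
        have h2 : (L.filter (fun q => !(q.2 == p.2))).filter (fun q => q.2 == k)
            = L.filter (fun q => q.2 == k) := by
          rw [List.filter_filter]
          apply List.filter_congr
          intro q _
          by_cases hq : q.2 = k
          · simp [hq, hkne]
          · simp [hq]
        rw [h1, h2]

lemma canon_eq (L : List (Int × Int)) :
    canonGroups L = (PySem.List.dedup (L.map (fun q => q.2))).map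
      (fun k => (k, (L.filter (fun q => q.2 == k)).map (fun q => q.1))) :=
  canon_eq_aux L.length L (le_refl _)


-- ofList of a key-descending list is strictly descending
lemma ofList_pairwise_gt (xs : List Int) (h : xs.Pairwise (fun a b => b ≤ a)) :
    (PySem.Set.ofList xs).Pairwise (fun a b => b < a) := by
  have main : ∀ (n : Nat) (ys : List Int), ys.length ≤ n →
      ys.Pairwise (fun a b => b ≤ a) → (PySem.Set.ofList ys).Pairwise (fun a b => b < a) := by
    intro n
    induction n with
    | zero =>
      intro ys hlen _
      have : ys = [] := List.eq_nil_of_length_eq_zero (Nat.le_zero.mp hlen)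
      subst this
      simp [PySem.Set.ofList_eq_foldl]
    | succ n ih =>
      intro ys hlen hp
      cases ys with
      | nil => simp [PySem.Set.ofList_eq_foldl]
      | cons a ys =>
        rw [dedup_cons]
        constructor
        · intro b hb
          rw [PySem.Set.mem_ofList] at hb
          have hmem := List.mem_of_mem_filter hb
          have hne : b ≠ a := by simpa using List.of_mem_filter hb
          exact lt_of_le_of_ne (List.rel_of_pairwise_cons hp hmem) hne
        · exact ih (ys.filter (fun x => !(x == a)))
            (le_trans (List.length_filter_le _ _) (Nat.le_of_succ_le_succ hlen))
            (hp.of_cons.filter _)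
  exact main xs.length xs (le_refl _) h

-- stability of Python's reverse sort: filtering one key commutes with sorting
lemma filter_insertBy (k : Int) (x : Int × Int) (ys : List (Int × Int))
    (h : ys.Pairwise (fun a b => b.2 ≤ a.2)) :
    (PySem.List.insertBy (fun a b => decide (b.2 < a.2)) x ys).filter (fun q => q.2 == k)
      = ys.filter (fun q => q.2 == k) ++ (if x.2 == k then [x] else []) := by
  induction ys with
  | nil => simp [PySem.List.insertBy, List.filter_cons]
  | cons y ys ih =>
    rw [PySem.List.insertBy]
    by_cases hby : y.2 < x.2
    · simp only [hby, decide_true, if_true]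
      by_cases hxk : x.2 = k
      · have hnil : (y :: ys).filter (fun q => q.2 == k) = [] := by
          rw [List.filter_eq_nil_iff]
          intro q hq
          have hqy : q.2 ≤ y.2 := by
            rcases List.mem_cons.mp hq with rfl | hq
            · exact le_refl _
            · exact List.rel_of_pairwise_cons h hq
          have : q.2 < k := by omega
          simp [ne_of_lt this]
        rw [List.filter_cons]
        simp only [hxk, beq_self_eq_true, if_true]
        rw [hnil]
        simp
      · simp [List.filter_cons, hxk]
    · simp only [hby, decide_false, Bool.false_eq_true, if_false]
      rw [List.filter_cons, List.filter_cons, ih h.of_cons]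
      by_cases hyk : y.2 = k <;> simp [hyk]

lemma filter_sorted (L : List (Int × Int)) (k : Int) :
    (PySem.List.sorted L (fun x => x.2) true).filter (fun q => q.2 == k)
      = L.filter (fun q => q.2 == k) := by
  rw [PySem.List.sorted_rev_eq_foldl_insertBy]
  induction L using List.reverseRecOn with
  | nil => simp
  | append_singleton L x ih =>
    rw [List.foldl_append, List.foldl_cons, List.foldl_nil]
    have hp : (List.foldl (fun acc x => PySem.List.insertBy
        (fun a b => decide ((fun x : Int × Int => x.2) b < (fun x : Int × Int => x.2) a)) x acc) [] L).Pairwise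
        (fun a b => b.2 ≤ a.2) := by
      rw [← PySem.List.sorted_rev_eq_foldl_insertBy]
      exact PySem.List.sorted_pairwise_rev L (fun x => x.2)
    rw [filter_insertBy k x _ hp, ih, List.filter_append, List.filter_cons, List.filter_nil]

-- ===== VERDICT (by name: the statement is the Claim_ definition above) =====
theorem gathered_by_lengths_py_spec : Claim_equal_gathered_by_lengths_py := by
  intro X _
  unfold Spec_gathered_by_lengths_py
  -- names for the intermediate lists
  set E := PySem.List.enumerate X with hE
  set L := E.map (fun p => (p.1, PySem.Str.len p.2)) with hL
  set S := PySem.List.sorted L (fun x => x.2) true with hS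
  -- A's result is the canonical grouping of the descending-sorted pair list
  have hA : gathered_by_lengths_py X = canonGroups S := by
    apply loopA
    · exact PySem.List.sorted_pairwise_rev _ _
    · intro p hp
      rw [PySem.List.mem_sorted] at hp
      obtain ⟨q, _, rfl⟩ := List.mem_map.mp hp
      simp only [PySem.Str.len]
      omega
  -- B's buckets: keys and values in closed form
  have hkeys : (E.foldl
      (fun (d : PySem.Dict Int (List Int)) p => d.modify (PySem.Str.len p.2) [] (· ++ [p.1]))
      PySem.Dict.empty).keys = PySem.Set.ofList (L.map (fun q => q.2)) := by
    have hk := PySem.Dict.keys_foldl_modify_key E (fun p => PySem.Str.len p.2)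
      ([] : List Int) (fun _ p v => v ++ [p.1]) PySem.Dict.empty
    have hmm : L.map (fun q => q.2) = E.map (fun p => PySem.Str.len p.2) := by
      simp [hL, List.map_map, Function.comp]
    rw [hmm]
    simpa [PySem.Dict.empty, PySem.Dict.keys, PySem.Set.update,
           PySem.Set.ofList_eq_foldl] using hk
  have hgetD : ∀ k : Int, (E.foldl
      (fun (d : PySem.Dict Int (List Int)) p => d.modify (PySem.Str.len p.2) [] (· ++ [p.1]))
      PySem.Dict.empty).getD k []
      = (L.filter (fun q => q.2 == k)).map (fun q => q.1) := by
    intro k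
    have hfm : E.foldl
        (fun (d : PySem.Dict Int (List Int)) p => d.modify (PySem.Str.len p.2) [] (· ++ [p.1]))
        PySem.Dict.empty
        = (E.map (fun p => (PySem.Str.len p.2, p.1))).foldl
            (fun d p => d.modify p.1 [] (· ++ [p.2])) PySem.Dict.empty := by
      rw [List.foldl_map]
    rw [hfm, PySem.Dict.getD_foldl_modify_append]
    have h1 : (PySem.Dict.empty : PySem.Dict Int (List Int)).getD k [] = [] := by
      simp [PySem.Dict.empty, PySem.Dict.getD, PySem.Dict.get?]
    rw [h1, List.nil_append, hL]
    rw [List.filter_map, List.filter_map]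
    simp [Function.comp_def]
  -- B's result in closed form
  have hB : gathered_by_lengths_py_alt X
      = (PySem.List.sorted (PySem.Set.ofList (L.map (fun q => q.2))) (fun k => k) true).map
          (fun k => (k, (L.filter (fun q => q.2 == k)).map (fun q => q.1))) := by
    show (PySem.List.sorted (E.foldl
        (fun (d : PySem.Dict Int (List Int)) p => d.modify (PySem.Str.len p.2) [] (· ++ [p.1]))
        PySem.Dict.empty).keys (fun k => k) true).map
        (fun k => (k, (E.foldl
          (fun (d : PySem.Dict Int (List Int)) p => d.modify (PySem.Str.len p.2) [] (· ++ [p.1]))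
          PySem.Dict.empty).getD k [])) = _
    rw [hkeys]
    exact List.map_congr_left (fun k _ => by rw [hgetD k])
  -- the two key sequences agree: sorting the distinct lengths descending
  have hsortkeys : PySem.List.sorted (PySem.Set.ofList (L.map (fun q => q.2))) (fun k => k) true
      = PySem.List.dedup (S.map (fun q => q.2)) := by
    apply PySem.List.sorted_rev_eq_of_perm_of_pairwise_gt
    · simp only [PySem.List.dedup]
      rw [List.perm_ext_iff_of_nodup (PySem.Set.nodup_ofList _) (PySem.Set.nodup_ofList _)]
      intro a
      rw [PySem.Set.mem_ofList, PySem.Set.mem_ofList]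
      simp [List.mem_map, hS, PySem.List.mem_sorted]
    · simp only [PySem.List.dedup]
      apply ofList_pairwise_gt
      rw [List.pairwise_map]
      exact PySem.List.sorted_pairwise_rev _ _
  rw [hA, hB, hsortkeys, canon_eq]
  apply List.map_congr_left
  intro k _
  rw [hS, filter_sorted]
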